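-- pv_equiv track=rewrite | github.com/Jiu-xiao/XRDAP-SWD-Probe | src/vcd_to_png.py | derive_sample_hold_tv_from_cycles
-- ===== SOURCE A (Python) =====
-- SAMPLE_EPS = 1  # avoid sampling exactly at transition timestamp
--
-- def normalize_1bit_val(v):
--     if v is None:
--         return 'x'
--     s = str(v)
--     if s in ('0', '1'):
--         return s
--     if s in ('x', 'X'):
--         return 'x'
--     if s in ('z', 'Z'):
--         return 'z'
--     if s.startswith('b') and len(s) >= 2:
--         bits = s[1:]
--         if len(bits) == 1 and bits in ('0', '1', 'x', 'z', 'X', 'Z'):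
--             return normalize_1bit_val(bits)
--         return 'x'
--     return 'x'
--
-- def value_at(tv, ts):
--     last = '0'
--     for t, v in sorted(tv, key=lambda x: x[0]):
--         if t > ts:
--             break
--         last = normalize_1bit_val(v)
--     return last
--
-- def derive_sample_hold_tv_from_cycles(cycles, tv_sig, edge="pos"):
--     """
--     Build a sample-hold waveform:
--       - edge="pos": sample tv_sig at each posedge+eps, update at posedge time
--       - edge="neg": sample tv_sig at each negedge+eps, update at negedge time
--     """
--     if not cycles or not tv_sig:
--         return []
--     out = []
--     last = None
--     for (tp, tn) in cycles:
--         if edge == "pos":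
--             t_upd = tp
--             t_smp = tp + SAMPLE_EPS
--         else:
--             t_upd = tn
--             t_smp = tn + SAMPLE_EPS
--         v = value_at(tv_sig, t_smp)
--         if v != last:
--             out.append((t_upd, v))
--             last = v
--     return out
-- ===== SOURCE B (Python) =====
-- SAMPLE_EPS = 1  # avoid sampling exactly at transition timestamp
--
--
-- def _bisect_right(a, x):
--     """Index of the first element of sorted list a strictly greater than x."""
--     lo, hi = 0, len(a)
--     while lo < hi:
--         mid = (lo + hi) // 2
--         if x < a[mid]:
--             hi = mid
--         else:
--             lo = mid + 1
--     return lo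
--
--
-- def _norm(v):
--     """Normalize a VCD scalar value token to '0', '1', 'x' or 'z'."""
--     s = str(v)
--     if len(s) == 2 and s[0] == 'b':
--         s = s[1:]
--     if s in ('0', '1'):
--         return s
--     if s in ('x', 'X'):
--         return 'x'
--     if s in ('z', 'Z'):
--         return 'z'
--     return 'x'
--
--
-- def derive_sample_hold_tv_from_cycles(cycles, tv_sig, edge="pos"):
--     """
--     Build a sample-hold waveform: sort tv_sig once, precompute the
--     normalized values, then binary-search each sample time.
--     """
--     if not cycles or not tv_sig:
--         return []
--     sorted_tv = sorted(tv_sig, key=lambda x: x[0])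
--     times = [t for t, _ in sorted_tv]
--     vals = [_norm(v) for _, v in sorted_tv]
--     out = []
--     last = None
--     for (tp, tn) in cycles:
--         t_upd = tp if edge == "pos" else tn
--         k = _bisect_right(times, t_upd + SAMPLE_EPS)
--         v = vals[k - 1] if k else '0'
--         if v != last:
--             out.append((t_upd, v))
--             last = v
--     return out
-- ===== Notes on version B (the rewrite author's own statement) =====
-- stated objective: faster
-- what changed: A re-sorts tv_sig and linearly scans it for every cycle; B sorts tv_sig once, precomputes the normalized value at each transition, and binary-searches (bisect_right) each cycle's sample time in the sorted timestamp list.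
import Mathlib
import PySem

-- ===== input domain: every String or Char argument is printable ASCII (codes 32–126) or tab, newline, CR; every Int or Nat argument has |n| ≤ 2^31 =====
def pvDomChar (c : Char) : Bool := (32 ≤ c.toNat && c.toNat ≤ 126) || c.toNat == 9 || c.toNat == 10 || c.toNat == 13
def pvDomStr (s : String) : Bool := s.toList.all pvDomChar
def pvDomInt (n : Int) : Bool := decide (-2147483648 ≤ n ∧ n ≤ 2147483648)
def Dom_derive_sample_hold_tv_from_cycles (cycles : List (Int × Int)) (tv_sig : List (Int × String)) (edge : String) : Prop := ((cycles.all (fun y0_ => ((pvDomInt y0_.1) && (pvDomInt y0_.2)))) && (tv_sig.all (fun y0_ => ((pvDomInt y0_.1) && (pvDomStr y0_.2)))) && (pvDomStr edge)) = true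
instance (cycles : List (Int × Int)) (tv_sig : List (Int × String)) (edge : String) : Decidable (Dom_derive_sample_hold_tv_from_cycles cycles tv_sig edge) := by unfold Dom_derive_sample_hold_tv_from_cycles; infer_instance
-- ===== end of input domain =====

-- B sorts tv_sig once, precomputes the normalized values, and binary-searches each
-- sample time, instead of A's re-sort + linear scan of tv_sig for every cycle (faster).

-- ===== PORT A =====
def SAMPLE_EPS : Int := 1

-- normalize_1bit_val; the 'v is None' branch is unreachable here (values are str, str(v) = v)
def normalize_1bit_val (s : String) : String :=
  if s = "0" ∨ s = "1" then s
  else if s = "x" ∨ s = "X" then "x"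
  else if s = "z" ∨ s = "Z" then "z"
  else if PySem.Str.startswith s "b" = true ∧ 2 ≤ PySem.Str.len s then
    let bits := PySem.Str.slice s (some 1) none
    if PySem.Str.len bits = 1 ∧ (bits = "0" ∨ bits = "1" ∨ bits = "x" ∨ bits = "z" ∨ bits = "X" ∨ bits = "Z") then
      normalize_1bit_val bits
    else "x"
  else "x"
termination_by s.toList.length
decreasing_by
  rename_i h _
  have h2 := h.2
  simp [PySem.Str.len_eq] at h2
  simp [PySem.Str.toList_slice, PySem.Chars.slice_eq_listSlice,
        PySem.List.slice_from _ (by omega : (0:Int) ≤ 1)]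
  omega

-- the 'for t, v in sorted(tv, key=…): if t > ts: break; last = …' loop of value_at
def value_at_go : List (Int × String) → Int → String → String
  | [], _, last => last
  | (t, v) :: rest, ts, last =>
    if t > ts then last else value_at_go rest ts (normalize_1bit_val v)

def value_at (tv : List (Int × String)) (ts : Int) : String :=
  value_at_go (PySem.List.sorted tv (fun x => x.1)) ts "0"

def derive_sample_hold_tv_from_cycles (cycles : List (Int × Int)) (tv_sig : List (Int × String)) (edge : String) : List (Int × String) :=
  if cycles = [] ∨ tv_sig = [] then []
  else
    (cycles.foldl (fun (st : List (Int × String) × Option String) c =>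
      let tu_ts := if edge = "pos" then (c.1, c.1 + SAMPLE_EPS) else (c.2, c.2 + SAMPLE_EPS)
      let v := value_at tv_sig tu_ts.2
      if some v ≠ st.2 then (st.1 ++ [(tu_ts.1, v)], some v) else st)
      ([], none)).1

-- ===== PORT B =====
-- _bisect_right's 'while lo < hi' loop (the intermediate 'mid' is inlined)
def bisect_right_go (a : List Int) (x : Int) (lo hi : Nat) : Nat :=
  if lo < hi then
    if x < a.getD ((lo + hi) / 2) 0 then bisect_right_go a x lo ((lo + hi) / 2)
    else bisect_right_go a x ((lo + hi) / 2 + 1) hi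
  else lo
termination_by hi - lo
decreasing_by all_goals omega

def norm_alt (v : String) : String :=
  let s := if PySem.Str.len v = 2 ∧ PySem.Str.pyGet? v 0 = some 'b' then PySem.Str.slice v (some 1) none else v
  if s = "0" ∨ s = "1" then s
  else if s = "x" ∨ s = "X" then "x"
  else if s = "z" ∨ s = "Z" then "z"
  else "x"

def derive_sample_hold_tv_from_cycles_alt (cycles : List (Int × Int)) (tv_sig : List (Int × String)) (edge : String) : List (Int × String) :=
  if cycles = [] ∨ tv_sig = [] then []
  else
    let sorted_tv := PySem.List.sorted tv_sig (fun x => x.1)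
    let times := sorted_tv.map (fun p => p.1)
    let vals := sorted_tv.map (fun p => norm_alt p.2)
    (cycles.foldl (fun (st : List (Int × String) × Option String) c =>
      let t_upd := if edge = "pos" then c.1 else c.2
      let k := bisect_right_go times (t_upd + SAMPLE_EPS) 0 times.length
      -- vals[k-1]: always in range here (1 ≤ k ≤ len vals), so getD is exact
      let v := if k = 0 then "0" else vals.getD (k - 1) "0"
      if some v ≠ st.2 then (st.1 ++ [(t_upd, v)], some v) else st)
      ([], none)).1

-- ===== PRECONDITION & SPEC =====
def Spec_derive_sample_hold_tv_from_cycles (cycles : List (Int × Int)) (tv_sig : List (Int × String)) (edge : String) (out : List (Int × String)) : Prop := out = derive_sample_hold_tv_from_cycles_alt cycles tv_sig edge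
instance (cycles : List (Int × Int)) (tv_sig : List (Int × String)) (edge : String) (out : List (Int × String)) : Decidable (Spec_derive_sample_hold_tv_from_cycles cycles tv_sig edge out) := by unfold Spec_derive_sample_hold_tv_from_cycles; infer_instance

-- ===== CLAIM (what is proved, stated in full; the proofs are below) =====
def Claim_equal_derive_sample_hold_tv_from_cycles : Prop := ∀ (cycles : List (Int × Int)) (tv_sig : List (Int × String)) (edge : String), Dom_derive_sample_hold_tv_from_cycles cycles tv_sig edge → Spec_derive_sample_hold_tv_from_cycles cycles tv_sig edge (derive_sample_hold_tv_from_cycles cycles tv_sig edge)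

-- ===== LEMMAS AND PROOFS =====

-- the two value normalizers agree on every string
theorem norm_eq (s : String) : normalize_1bit_val s = norm_alt s := by
  have hs : s = String.ofList s.toList := by simp
  rcases hcs : s.toList with _ | ⟨a, _ | ⟨b, _ | ⟨c, t⟩⟩⟩
  · rw [hs, hcs]
    simp [normalize_1bit_val, norm_alt, PySem.Str.len_eq, ← String.toList_inj]
  · rw [hs, hcs]
    rw [normalize_1bit_val, norm_alt]
    simp [PySem.Str.len_eq, ← String.toList_inj]
  · rw [hs, hcs]
    have hbits : PySem.Str.slice (String.ofList [a, b]) (some 1) none = String.ofList [b] := by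
      rw [← String.toList_inj]
      simp [PySem.Str.toList_slice, PySem.Chars.slice_eq_listSlice,
            PySem.List.slice_from _ (by omega : (0:Int) ≤ 1)]
    by_cases hb : a = 'b'
    · subst hb
      by_cases h0 : b = '0'
      · subst h0; simp [normalize_1bit_val, norm_alt, hbits, PySem.Str.len_eq, ← String.toList_inj, PySem.Str.startswith_eq, PySem.Chars.startswith_iff, List.cons_prefix_cons]
      by_cases h1 : b = '1'
      · subst h1; simp [normalize_1bit_val, norm_alt, hbits, PySem.Str.len_eq, ← String.toList_inj, PySem.Str.startswith_eq, PySem.Chars.startswith_iff, List.cons_prefix_cons]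
      by_cases hx : b = 'x'
      · subst hx; simp [normalize_1bit_val, norm_alt, hbits, PySem.Str.len_eq, ← String.toList_inj, PySem.Str.startswith_eq, PySem.Chars.startswith_iff, List.cons_prefix_cons]
      by_cases hz : b = 'z'
      · subst hz; simp [normalize_1bit_val, norm_alt, hbits, PySem.Str.len_eq, ← String.toList_inj, PySem.Str.startswith_eq, PySem.Chars.startswith_iff, List.cons_prefix_cons]
      by_cases hX : b = 'X'
      · subst hX; simp [normalize_1bit_val, norm_alt, hbits, PySem.Str.len_eq, ← String.toList_inj, PySem.Str.startswith_eq, PySem.Chars.startswith_iff, List.cons_prefix_cons]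
      by_cases hZ : b = 'Z'
      · subst hZ; simp [normalize_1bit_val, norm_alt, hbits, PySem.Str.len_eq, ← String.toList_inj, PySem.Str.startswith_eq, PySem.Chars.startswith_iff, List.cons_prefix_cons]
      rw [normalize_1bit_val, norm_alt]
      simp [PySem.Str.len_eq, hbits, ← String.toList_inj,
            PySem.Str.startswith_eq, PySem.Chars.startswith_iff,
            h0, h1, hx, hz, hX, hZ]
    · rw [normalize_1bit_val, norm_alt]
      have hb' : ¬ ('b' = a) := fun h => hb h.symm
      simp [PySem.Str.len_eq, ← String.toList_inj,
            PySem.Str.startswith_eq, PySem.Chars.startswith_iff, hb', hb]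
  · rw [hs, hcs]
    have hlen : ¬ ((t.length : Int) + 1 + 1 + 1 = 2) := by omega
    by_cases hb : a = 'b'
    · subst hb
      rw [normalize_1bit_val, norm_alt]
      simp [PySem.Str.len_eq, ← String.toList_inj, hlen,
            PySem.Str.startswith_eq, PySem.Chars.startswith_iff,
            PySem.Str.toList_slice, PySem.Chars.slice_eq_listSlice,
            PySem.List.slice_from _ (by omega : (0:Int) ≤ 1)]
    · rw [normalize_1bit_val, norm_alt]
      have hb' : ¬ ('b' = a) := fun h => hb h.symm
      simp [PySem.Str.len_eq, ← String.toList_inj, hlen,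
            PySem.Str.startswith_eq, PySem.Chars.startswith_iff, hb']

-- bisect loop invariant: result k keeps a[j] ≤ x for j < k and x < a[j] for k ≤ j
theorem bisect_right_go_spec (a : List Int) (x : Int)
    (hmono : a.Pairwise (· ≤ ·)) (lo hi : Nat)
    (hhi : hi ≤ a.length) (hlo : lo ≤ hi)
    (hlow : ∀ j, j < lo → ∀ hj : j < a.length, a[j] ≤ x)
    (hhigh : ∀ j, hi ≤ j → ∀ hj : j < a.length, x < a[j]) :
    lo ≤ bisect_right_go a x lo hi ∧ bisect_right_go a x lo hi ≤ hi ∧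
    (∀ j, j < bisect_right_go a x lo hi → ∀ hj : j < a.length, a[j] ≤ x) ∧
    (∀ j, bisect_right_go a x lo hi ≤ j → ∀ hj : j < a.length, x < a[j]) := by
  have hget : ∀ (i j : Nat) (hi' : i < a.length) (hj' : j < a.length), i ≤ j → a[i] ≤ a[j] := by
    intro i j hi' hj' hij
    rcases Nat.lt_or_ge i j with h | h
    · exact (List.pairwise_iff_getElem.mp hmono) i j hi' hj' h
    · have : i = j := by omega
      subst this; exact le_refl _
  induction lo, hi using bisect_right_go.induct a x with
  | case1 lo hi h hx ih =>
    rw [bisect_right_go, if_pos h, if_pos hx]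
    have hmidlen : (lo + hi) / 2 < a.length := by omega
    rw [List.getD_eq_getElem a 0 hmidlen] at hx
    obtain ⟨h1, h2, h3, h4⟩ := ih (by omega) (by omega) hlow
      (fun j hj hj' => lt_of_lt_of_le hx (hget _ j hmidlen hj' hj))
    exact ⟨h1, by omega, h3, h4⟩
  | case2 lo hi h hx ih =>
    rw [bisect_right_go, if_pos h, if_neg hx]
    have hmidlen : (lo + hi) / 2 < a.length := by omega
    rw [List.getD_eq_getElem a 0 hmidlen] at hx
    push Not at hx
    obtain ⟨h1, h2, h3, h4⟩ := ih (by omega) (by omega)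
      (fun j hj hj' => le_trans (hget j _ hj' hmidlen (by omega)) hx) hhigh
    exact ⟨by omega, h2, h3, h4⟩
  | case3 lo hi h =>
    rw [bisect_right_go, if_neg h]
    exact ⟨le_refl _, by omega, fun j hj hj' => hlow j (by omega) hj', fun j hj hj' => hhigh j (by omega) hj'⟩

-- value_at's break loop, characterized by the split point k
theorem value_at_go_char (L : List (Int × String)) (ts : Int) : ∀ (k : Nat) (last : String),
    k ≤ L.length →
    (∀ j, j < k → ∀ hj : j < L.length, L[j].1 ≤ ts) →
    (∀ hk2 : k < L.length, ts < L[k].1) →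
    value_at_go L ts last = if k = 0 then last else normalize_1bit_val (L.getD (k - 1) (0, "")).2 := by
  induction L with
  | nil => intro k last hk _ _; simp at hk; simp [hk, value_at_go]
  | cons p rest ih =>
    intro k last hk hle hgt
    obtain ⟨t, v⟩ := p
    rcases k with _ | k'
    · have hts : ts < t := by simpa using hgt (by simp)
      simp [value_at_go, hts]
    · have htle : t ≤ ts := by simpa using hle 0 (by omega) (by simp)
      have hngt : ¬ (t > ts) := by omega
      simp only [value_at_go, if_neg hngt]
      rw [ih k' (normalize_1bit_val v) (by simpa using hk)
        (fun j hj hj' => by simpa using hle (j+1) (by omega) (by simpa using hj'))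
        (fun hk2 => by simpa using hgt (by simpa using hk2))]
      rcases Nat.eq_zero_or_pos k' with h0 | hpos
      · simp [h0]
      · obtain ⟨m, rfl⟩ : ∃ m, k' = m + 1 := ⟨k' - 1, by omega⟩
        simp

-- per-sample agreement: A's value_at = B's precomputed-table lookup
theorem sample_eq (tv : List (Int × String)) (ts : Int) :
    value_at tv ts =
      (let L := PySem.List.sorted tv (fun x => x.1)
       let k := bisect_right_go (L.map (fun p => p.1)) ts 0 (L.map (fun p => p.1)).length
       if k = 0 then "0" else (L.map (fun p => norm_alt p.2)).getD (k - 1) "0") := by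
  simp only []
  set L := PySem.List.sorted tv (fun x => x.1) with hL
  set a := L.map (fun p => p.1) with ha
  have hmono : a.Pairwise (· ≤ ·) := by
    rw [ha, List.pairwise_map]
    exact PySem.List.sorted_pairwise tv (fun x => x.1)
  have hlen : a.length = L.length := by rw [ha]; exact List.length_map ..
  obtain ⟨h1, h2, h3, h4⟩ := bisect_right_go_spec a ts hmono 0 a.length (le_refl _) (Nat.zero_le _)
    (fun j hj _ => by omega) (fun j hj hj' => by omega)
  set k := bisect_right_go a ts 0 a.length with hk
  rw [value_at, ← hL, value_at_go_char L ts k "0" (by omega)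
    (fun j hj hj' => by
      have := h3 j hj (by omega)
      simpa only [ha, List.getElem_map] using this)
    (fun hk2 => by
      have := h4 k (le_refl _) (by omega)
      simpa only [ha, List.getElem_map] using this)]
  rcases Nat.eq_zero_or_pos k with h0 | hpos
  · simp [h0]
  · have hkl : k - 1 < L.length := by omega
    rw [if_neg (by omega), if_neg (by omega),
        List.getD_eq_getElem _ _ hkl,
        List.getD_eq_getElem _ _ (by rw [List.length_map]; omega),
        List.getElem_map]
    exact norm_eq _

-- ===== VERDICT (by name: the statement is the Claim_ definition above) =====
theorem derive_sample_hold_tv_from_cycles_spec : Claim_equal_derive_sample_hold_tv_from_cycles := by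
  intro cycles tv_sig edge _
  unfold Spec_derive_sample_hold_tv_from_cycles
  unfold derive_sample_hold_tv_from_cycles derive_sample_hold_tv_from_cycles_alt
  by_cases hemp : cycles = [] ∨ tv_sig = []
  · simp [hemp]
  · simp only [if_neg hemp]
    congr 1
    apply PySem.List.foldl_congr_mem
    intro st c _
    have hs := sample_eq tv_sig (if edge = "pos" then c.1 + SAMPLE_EPS else c.2 + SAMPLE_EPS)
    by_cases he : edge = "pos" <;> simp only [he, if_pos, reduceIte] at hs ⊢ <;>
      rw [hs]
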